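-- pv_equiv track=rewrite | github.com/PBiret/AdventOfcode2019 | day8/puzzle2.py | extract_layers
-- ===== SOURCE A (Python) =====
-- def extract_layers(input_number, width, height):
--     layers = []
--
--     number_layers = len(input_number)//(width*height)
--
--     for k in range(number_layers):
--         new_layer = [[0] * width]*height
--
--         for i in range(height):
--             row = list(input_number[k*width*height + i*width:k*width*height + (i+1)*width])
--             new_layer[i] = (list(map(lambda x : int(x),row)))
--         layers += [new_layer]
--
--     return layers
-- ===== SOURCE B (Python) =====
-- def extract_layers(input_number, width, height):
--     size = width * height
--     number_layers = len(input_number) // size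
--     if number_layers <= 0:
--         return []
--     layers = []
--     layer = []
--     row = []
--     for c in input_number[:number_layers * size]:
--         row.append(int(c))
--         if len(row) == width:
--             layer.append(row)
--             row = []
--             if len(layer) == height:
--                 layers.append(layer)
--                 layer = []
--     return layers
-- ===== Notes on version B (the rewrite author's own statement) =====
-- stated objective: alternative
-- what changed: A slices the digit string row by row inside nested loops and writes each converted row into a pre-allocated mutable layer; B makes one streaming pass over the used prefix with row/layer accumulators, flushing a row every width digits and a layer every height rows (after an early return when no complete layer fits).
-- intended difference: On inputs with both dimensions negative and the string at least width*height characters long, A returns number_layers copies of an empty layer without ever reading the string (an artefact of its never-running row loop over range(height)); B returns [], the intended answer since no layer of the requested shape can be extracted. — e.g. on extract_layers("00", -1, -2): A returns [[]], B returns []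
-- outside the precondition, e.g. on extract_layers('ab', -1, -2): A returns [[]], B raises ValueError
import Mathlib
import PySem

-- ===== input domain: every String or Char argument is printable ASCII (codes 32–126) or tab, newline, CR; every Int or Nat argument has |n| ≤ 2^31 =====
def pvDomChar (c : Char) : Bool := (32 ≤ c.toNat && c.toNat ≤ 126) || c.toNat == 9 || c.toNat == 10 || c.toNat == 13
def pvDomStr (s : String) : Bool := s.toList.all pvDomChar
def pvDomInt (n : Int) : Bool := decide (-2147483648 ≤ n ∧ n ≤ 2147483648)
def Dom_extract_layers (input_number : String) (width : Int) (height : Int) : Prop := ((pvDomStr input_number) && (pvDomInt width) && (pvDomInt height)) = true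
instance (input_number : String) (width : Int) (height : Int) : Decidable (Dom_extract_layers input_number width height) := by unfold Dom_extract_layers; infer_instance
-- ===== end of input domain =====

-- B replaces A's nested slice-and-mutate loops by one streaming pass over the used digit prefix with
-- row/layer accumulators flushed when full ('alternative' objective; same asymptotic cost).

-- int(x) for a one-character string x (both Pythons convert characters this way)
def pvIntChar (c : Char) : Int := (PySem.Int.ofStr? (String.ofList [c])).getD 0

-- ===== PORT A =====
def extract_layers (input_number : String) (width : Int) (height : Int) : List (List (List Int)) :=
  let number_layers := PySem.Int.floordiv (PySem.Str.len input_number) (width * height)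
  (PySem.List.pyRange 0 number_layers 1).foldl (fun layers k =>
    let new_layer : List (List Int) := List.replicate height.toNat (List.replicate width.toNat 0)
    let new_layer :=
      (PySem.List.pyRange 0 height 1).foldl (fun nl i =>
        let row := PySem.List.slice input_number.toList
          (some (k * width * height + i * width)) (some (k * width * height + (i + 1) * width))
        nl.set i.toNat (row.map pvIntChar)) new_layer
    layers ++ [new_layer]) []

-- ===== PORT B =====
-- the body of B's for-loop over the characters of the used prefix
def pvStep (width height : Int) (st : List (List (List Int)) × List (List Int) × List Int)
    (c : Char) : List (List (List Int)) × List (List Int) × List Int :=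
  let row := st.2.2 ++ [pvIntChar c]
  if (row.length : Int) = width then
    let layer := st.2.1 ++ [row]
    if (layer.length : Int) = height then (st.1 ++ [layer], [], [])
    else (st.1, layer, [])
  else (st.1, st.2.1, row)

def extract_layers_alt (input_number : String) (width : Int) (height : Int) : List (List (List Int)) :=
  let size := width * height
  let number_layers := PySem.Int.floordiv (PySem.Str.len input_number) size
  if number_layers ≤ 0 then []
  else
    ((PySem.List.slice input_number.toList none (some (number_layers * size))).foldl
      (pvStep width height) ([], [], [])).1

-- ===== PRECONDITION & SPEC =====
-- Pre_ excludes width*height = 0 (A raises ZeroDivisionError) and, when width*height > 0, used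
-- prefixes containing a non-digit (with positive dimensions A raises ValueError there; with both
-- dimensions negative A never reads the string while B's int() raises).
def Pre_extract_layers (input_number : String) (width : Int) (height : Int) : Prop :=
  width * height ≠ 0 ∧
  (0 < width * height →
    ((input_number.toList.take
        ((PySem.Int.floordiv (PySem.Str.len input_number) (width * height)) * (width * height)).toNat).all
      (fun c => PySem.Chars.isdigit c)) = true)
instance (input_number : String) (width : Int) (height : Int) : Decidable (Pre_extract_layers input_number width height) := by unfold Pre_extract_layers; infer_instance

def pvWitness_extract_layers : String × Int × Int := ("123456789012", 3, 2)

-- On inputs with both dimensions negative and the string at least width*height characters long,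
-- A returns number_layers copies of an empty layer without ever reading the string (an artefact of
-- its never-running row loop); B returns [], the intended answer since no layer of the requested
-- shape can be extracted.
def D_extract_layers (input_number : String) (width : Int) (height : Int) : Prop :=
  width < 0 ∧ height < 0 ∧ width * height ≤ PySem.Str.len input_number
instance (input_number : String) (width : Int) (height : Int) : Decidable (D_extract_layers input_number width height) := by unfold D_extract_layers; infer_instance

def Spec_extract_layers (input_number : String) (width : Int) (height : Int) (out : List (List (List Int))) : Prop := ¬ D_extract_layers input_number width height → out = extract_layers_alt input_number width height
instance (input_number : String) (width : Int) (height : Int) (out : List (List (List Int))) : Decidable (Spec_extract_layers input_number width height out) := by unfold Spec_extract_layers; infer_instance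

def pvDiffWitness_extract_layers : String × Int × Int := ("00", -1, -2)
def pvDiffWitnessOut_extract_layers : (List (List (List Int))) × (List (List (List Int))) := ([[]], [])

-- ===== CLAIM (what is proved, stated in full; the proofs are below) =====
def Claim_unchanged_extract_layers : Prop := ∀ (input_number : String) (width : Int) (height : Int), Dom_extract_layers input_number width height → Pre_extract_layers input_number width height → Spec_extract_layers input_number width height (extract_layers input_number width height)
def Claim_changed_extract_layers : Prop := Dom_extract_layers (pvDiffWitness_extract_layers.1) (pvDiffWitness_extract_layers.2.1) (pvDiffWitness_extract_layers.2.2) ∧ Pre_extract_layers (pvDiffWitness_extract_layers.1) (pvDiffWitness_extract_layers.2.1) (pvDiffWitness_extract_layers.2.2) ∧ D_extract_layers (pvDiffWitness_extract_layers.1) (pvDiffWitness_extract_layers.2.1) (pvDiffWitness_extract_layers.2.2) ∧ extract_layers (pvDiffWitness_extract_layers.1) (pvDiffWitness_extract_layers.2.1) (pvDiffWitness_extract_layers.2.2) = pvDiffWitnessOut_extract_layers.1 ∧ extract_layers_alt (pvDiffWitness_extract_layers.1) (pvDiffWitness_extract_layers.2.1) (pvDiffWitness_extract_layers.2.2) =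 pvDiffWitnessOut_extract_layers.2 ∧ pvDiffWitnessOut_extract_layers.1 ≠ pvDiffWitnessOut_extract_layers.2
def Claim_exact_extract_layers : Prop := ∀ (input_number : String) (width : Int) (height : Int), Dom_extract_layers input_number width height → Pre_extract_layers input_number width height → D_extract_layers input_number width height → extract_layers input_number width height ≠ extract_layers_alt input_number width height

-- ===== LEMMAS AND PROOFS =====

-- proof-side recursion structure of B's streaming pass: the rows of one layer, the layers of the prefix
def pvRows (W : Nat) : Nat → List Char → List (List Int)
  | 0, _ => []
  | m + 1, cs => (cs.take W).map pvIntChar :: pvRows W m (cs.drop W)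

def pvBlocks (W H : Nat) : Nat → List Char → List (List (List Int))
  | 0, _ => []
  | n + 1, cs => pvRows W H (cs.take (W * H)) :: pvBlocks W H n (cs.drop (W * H))

-- a nonnegative number floor-divided by a negative one is ≤ 0
lemma pv_floordiv_nonpos (a b : Int) (ha : 0 ≤ a) (hb : b < 0) : PySem.Int.floordiv a b ≤ 0 := by
  simp only [PySem.Int.floordiv]
  obtain ⟨m, rfl⟩ := Int.eq_negSucc_of_lt_zero hb
  obtain ⟨n, rfl⟩ := Int.eq_ofNat_of_zero_le ha
  cases n with
  | zero => simp [Int.fdiv]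
  | succ k => exact (Int.negSucc_lt_zero _).le

-- writing every cell of a list by index inside a loop yields the map of the writes
lemma pv_foldl_set_range' {α : Type} (g : Nat → α) :
    ∀ (m j : Nat) (l : List α), l.length = j + m →
      (List.range' j m).foldl (fun nl i => nl.set i (g i)) l = l.take j ++ (List.range' j m).map g := by
  intro m
  induction m with
  | zero =>
    intro j l hl
    simp [List.take_of_length_le (by omega : l.length ≤ j)]
  | succ m ih =>
    intro j l hl
    rw [List.range'_succ]
    simp only [List.foldl_cons, List.map_cons]
    rw [ih (j + 1) (l.set j (g j)) (by simp [hl]; omega)]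
    have hj : j < l.length := by omega
    rw [List.set_eq_take_cons_drop (g j) hj]
    rw [List.take_append]
    have h1 : (l.take j).take (j + 1) = l.take j := by
      rw [List.take_take]; congr 1; omega
    have h2 : j + 1 - (l.take j).length = 1 := by
      simp [List.length_take]; omega
    rw [h1, h2]
    simp

lemma pv_foldl_set_range {α : Type} (H : Nat) (g : Nat → α) (init : List α)
    (hlen : init.length = H) :
    (List.range H).foldl (fun nl i => nl.set i (g i)) init = (List.range H).map g := by
  have h := pv_foldl_set_range' g H 0 init (by omega)
  simpa [List.range_eq_range'] using h

-- A's row slice in drop/take form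
lemma pv_row_slice (l : List Char) (K W H I : Nat) :
    PySem.List.slice l (some ((K : Int) * W * H + I * W)) (some ((K : Int) * W * H + ((I : Int) + 1) * W))
      = (l.drop (K * W * H + I * W)).take W := by
  have e1 : ((K : Int) * W * H + I * W) = ((K * W * H + I * W : Nat) : Int) := by push_cast; ring
  have e2 : ((K : Int) * W * H + ((I : Int) + 1) * W) = ((K * W * H + (I + 1) * W : Nat) : Int) := by push_cast; ring
  rw [e1, e2, PySem.List.slice_natCast]
  congr 1
  have : (I + 1) * W = I * W + W := by ring
  omega

-- dropping then taking inside a prefix long enough sees the same window as the full list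
lemma pv_take_drop_take {α : Type} (l : List α) (S j W : Nat) (h : j + W ≤ S) :
    ((l.take S).drop j).take W = (l.drop j).take W := by
  rw [List.drop_take, List.take_take]
  congr 1
  omega

-- if either dimension is negative no layer is ever flushed: the layers component never changes
lemma pv_foldl_step_first (width height : Int) (hneg : width < 0 ∨ height < 0) :
    ∀ (cs : List Char) (st : List (List (List Int)) × List (List Int) × List Int),
      (cs.foldl (pvStep width height) st).1 = st.1 := by
  intro cs
  induction cs with
  | nil => intro st; rfl
  | cons c cs ih =>
    intro st
    rw [List.foldl_cons, ih]
    simp only [pvStep]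
    split_ifs with h1 h2
    · exfalso
      rcases hneg with hw | hh
      · have := Int.natCast_nonneg (st.2.2 ++ [pvIntChar c]).length; omega
      · have := Int.natCast_nonneg (st.2.1 ++ [st.2.2 ++ [pvIntChar c]]).length; omega
    · rfl
    · rfl

-- folding one full row's worth of characters flushes exactly one row (and the layer when it fills)
lemma pv_fold_row (W H : Nat) :
    ∀ (cs : List Char) (r : List Int) (layers : List (List (List Int))) (layer : List (List Int)),
      r.length + cs.length = W → cs ≠ [] →
      cs.foldl (pvStep (W : Int) (H : Int)) (layers, layer, r) =
        if layer.length + 1 = H then (layers ++ [layer ++ [r ++ cs.map pvIntChar]], [], [])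
        else (layers, layer ++ [r ++ cs.map pvIntChar], []) := by
  intro cs
  induction cs with
  | nil => intro r layers layer _ hne; exact absurd rfl hne
  | cons c cs ih =>
    intro r layers layer hlen _
    rw [List.foldl_cons]
    cases cs with
    | nil =>
      -- last character of the row: flush
      simp only [List.length_cons, List.length_nil] at hlen
      simp only [pvStep, List.foldl_nil]
      have hW : (((r ++ [pvIntChar c]).length : Nat) : Int) = (W : Int) := by
        simp only [List.length_append, List.length_cons, List.length_nil]
        omega
      rw [if_pos hW]
      by_cases hH : layer.length + 1 = H
      · rw [if_pos (by simp only [List.length_append, List.length_cons, List.length_nil]; omega),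
          if_pos hH]
        simp
      · rw [if_neg (by simp only [List.length_append, List.length_cons, List.length_nil]; omega),
          if_neg hH]
        simp
    | cons c2 cs2 =>
      -- more characters remain in this row: accumulate
      simp only [pvStep]
      have hlt : r.length + 1 < W := by
        simp only [List.length_cons] at hlen
        omega
      rw [if_neg (by simp only [List.length_append, List.length_cons, List.length_nil]; omega)]
      rw [ih (r ++ [pvIntChar c]) layers layer
        (by simp only [List.length_cons] at hlen ⊢; simp; omega) (by simp)]
      simp

-- folding m full rows' worth of characters onto a layer missing exactly m rows flushes the layer
lemma pv_fold_layer (W H : Nat) (hW : 0 < W) :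
    ∀ (m : Nat) (cs : List Char) (layers : List (List (List Int))) (layer : List (List Int)),
      0 < m → cs.length = m * W → layer.length + m = H →
      cs.foldl (pvStep (W : Int) (H : Int)) (layers, layer, []) =
        (layers ++ [layer ++ pvRows W m cs], [], []) := by
  intro m
  induction m with
  | zero => intro _ _ _ h; omega
  | succ m ih =>
    intro cs layers layer _ hlen hH
    rcases Nat.eq_zero_or_pos m with rfl | hm
    · -- last row of the layer
      rw [pv_fold_row W H cs [] layers layer (by simpa using hlen)
          (by intro h; subst h; simp at hlen; omega)]
      rw [if_pos (by omega)]
      have hcs : cs.take W = cs := List.take_of_length_le (by omega)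
      simp [pvRows, hcs]
    · -- a middle row, then the rest by induction
      have hsplit : cs = cs.take W ++ cs.drop W := (List.take_append_drop W cs).symm
      rw [hsplit, List.foldl_append]
      rw [pv_fold_row W H (cs.take W) [] layers layer
          (by simp [List.length_take, hlen]; nlinarith)
          (by simp [List.length_eq_zero_iff.symm, List.length_take, hlen]; nlinarith)]
      rw [if_neg (by omega)]
      rw [ih (cs.drop W) layers (layer ++ [[] ++ (cs.take W).map pvIntChar]) hm
          (by rw [List.length_drop, hlen]
              have : (m + 1) * W = m * W + W := by ring
              omega)
          (by simp; omega)]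
      simp [pvRows]

-- folding n layers' worth of characters produces the n chunked layers
lemma pv_fold_blocks (W H : Nat) (hW : 0 < W) (hH : 0 < H) :
    ∀ (n : Nat) (cs : List Char) (layers : List (List (List Int))),
      cs.length = n * (W * H) →
      cs.foldl (pvStep (W : Int) (H : Int)) (layers, [], []) =
        (layers ++ pvBlocks W H n cs, [], []) := by
  intro n
  induction n with
  | zero =>
    intro cs layers hlen
    have hc : cs = [] := List.length_eq_zero_iff.mp (by omega)
    subst hc
    simp [pvBlocks]
  | succ n ih =>
    intro cs layers hlen
    have hsplit : cs = cs.take (W * H) ++ cs.drop (W * H) := (List.take_append_drop _ cs).symm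
    rw [hsplit, List.foldl_append]
    rw [pv_fold_layer W H hW H (cs.take (W * H)) layers [] hH
        (by simp only [List.length_take, hlen]
            rw [Nat.min_eq_left (by nlinarith)]; ring)
        (by simp)]
    rw [ih (cs.drop (W * H)) _
        (by rw [List.length_drop, hlen]
            have : (n + 1) * (W * H) = n * (W * H) + W * H := by ring
            omega)]
    simp [pvBlocks]

-- pvRows as a map over row indices
lemma pv_rows_eq (W : Nat) :
    ∀ (m : Nat) (cs : List Char),
      pvRows W m cs = (List.range m).map (fun i => ((cs.drop (i * W)).take W).map pvIntChar) := by
  intro m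
  induction m with
  | zero => intro cs; simp [pvRows]
  | succ m ih =>
    intro cs
    rw [List.range_succ_eq_map]
    simp only [pvRows, List.map_cons, List.map_map, Function.comp_def]
    rw [ih (cs.drop W)]
    congr 1
    · simp
    · apply List.map_congr_left
      intro i _
      rw [List.drop_drop]
      have h : W + i * W = i.succ * W := by simp only [Nat.succ_eq_add_one]; ring
      rw [h]

-- pvBlocks as a nested map over layer and row indices
lemma pv_blocks_eq (W H : Nat) :
    ∀ (n : Nat) (cs : List Char),
      pvBlocks W H n cs = (List.range n).map (fun k =>
        (List.range H).map (fun i => ((cs.drop (k * (W * H) + i * W)).take W).map pvIntChar)) := by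
  intro n
  induction n with
  | zero => intro cs; simp [pvBlocks]
  | succ n ih =>
    intro cs
    rw [List.range_succ_eq_map]
    simp only [pvBlocks, List.map_cons, List.map_map, Function.comp_def]
    rw [ih (cs.drop (W * H)), pv_rows_eq W H (cs.take (W * H))]
    congr 1
    · apply List.map_congr_left
      intro i hi
      rw [pv_take_drop_take _ (W * H) (i * W) W
          (by rw [List.mem_range] at hi; nlinarith)]
      simp
    · apply List.map_congr_left
      intro k _
      apply List.map_congr_left
      intro i _
      rw [List.drop_drop]
      have h : W * H + (k * (W * H) + i * W) = k.succ * (W * H) + i * W := by simp only [Nat.succ_eq_add_one]; ring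
      rw [h]

-- both sides are empty when no complete layer fits (number_layers ≤ 0)
lemma pv_both_empty (s : String) (w h : Int)
    (hn : PySem.Int.floordiv (PySem.Str.len s) (w * h) ≤ 0) :
    extract_layers s w h = [] ∧ extract_layers_alt s w h = [] := by
  constructor
  · simp only [extract_layers]
    rw [PySem.List.pyRange_one_eq_nil hn]
    rfl
  · simp only [extract_layers_alt]
    rw [if_pos hn]

-- ===== VERDICT (by name: the statement is the Claim_ definition above) =====
theorem extract_layers_spec : Claim_unchanged_extract_layers := by
  intro s w h _hdom hpre hnd
  obtain ⟨hne, _hdig⟩ := hpre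
  rcases lt_trichotomy (w * h) 0 with hneg | hz | hpos
  · obtain ⟨ha, hb⟩ := pv_both_empty s w h
      (pv_floordiv_nonpos _ _ (by rw [PySem.Str.len_eq]; exact Int.natCast_nonneg _) hneg)
    rw [ha, hb]
  · exact absurd hz hne
  · by_cases hw : 0 < w
    swap
    · -- both dimensions negative; outside D_ the string is too short for even one layer
      have hwneg : w < 0 := by
        rcases lt_trichotomy w 0 with h1 | h1 | h1
        · exact h1
        · exact absurd (by rw [h1, zero_mul]) hne
        · exact absurd h1 hw
      have hhneg : h < 0 := by nlinarith
      have hlt : PySem.Str.len s < w * h := by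
        by_contra hge
        exact hnd ⟨hwneg, hhneg, by omega⟩
      have hn0 : PySem.Int.floordiv (PySem.Str.len s) (w * h) ≤ 0 := by
        have h1 : PySem.Int.floordiv (PySem.Str.len s) (w * h) < 1 :=
          (PySem.Int.floordiv_lt_iff_lt_mul hpos).mpr (by rw [one_mul]; exact hlt)
        omega
      obtain ⟨ha, hb⟩ := pv_both_empty s w h hn0
      rw [ha, hb]
    · -- both dimensions positive: the main case
      have hh : 0 < h := by nlinarith
      obtain ⟨W, rfl⟩ := Int.eq_ofNat_of_zero_le hw.le
      obtain ⟨H, rfl⟩ := Int.eq_ofNat_of_zero_le hh.le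
      have hW : 0 < W := by exact_mod_cast hw
      have hHn : 0 < H := by exact_mod_cast hh
      have hflo : PySem.Int.floordiv (PySem.Str.len s) ((W : Int) * (H : Int))
          = ((s.toList.length / (W * H) : Nat) : Int) := by
        rw [PySem.Str.len_eq,
          show ((W : Int) * (H : Int)) = ((W * H : Nat) : Int) by push_cast; ring]
        exact PySem.Int.floordiv_natCast _ _
      set N := s.toList.length / (W * H) with hNdef
      rcases Nat.eq_zero_or_pos N with hN0 | hNpos
      · obtain ⟨ha, hb⟩ := pv_both_empty s _ _ (by rw [hflo, hN0]; simp)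
        rw [ha, hb]
      · have hNle : N * (W * H) ≤ s.toList.length := Nat.div_mul_le_self _ _
        have hB : extract_layers_alt s (W : Int) (H : Int)
            = (List.range N).map (fun k => (List.range H).map (fun i =>
                ((s.toList.drop (k * (W * H) + i * W)).take W).map pvIntChar)) := by
          simp only [extract_layers_alt]
          rw [hflo, if_neg (by simp; omega),
            show ((N : Int) * ((W : Int) * (H : Int))) = ((N * (W * H) : Nat) : Int) by
              push_cast; ring,
            PySem.List.slice_to_natCast,
            pv_fold_blocks W H hW hHn N _ [] (by rw [List.length_take]; exact Nat.min_eq_left hNle),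
            pv_blocks_eq]
          simp only [List.nil_append]
          apply List.map_congr_left
          intro k hk
          apply List.map_congr_left
          intro i hi
          rw [List.mem_range] at hk hi
          rw [pv_take_drop_take _ _ _ _ (by nlinarith)]
        rw [hB]
        simp only [extract_layers]
        rw [hflo]
        simp only [PySem.List.pyRange_one, sub_zero, Int.toNat_natCast, zero_add]
        rw [PySem.List.foldl_append_singleton_eq_map]
        simp only [List.nil_append, List.map_map, Function.comp_def]
        apply List.map_congr_left
        intro K _
        rw [List.foldl_map]
        simp only [Int.toNat_natCast]
        rw [pv_foldl_set_range H _ _ (by simp)]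
        apply List.map_congr_left
        intro I _
        rw [pv_row_slice]
        have e : K * W * H + I * W = K * (W * H) + I * W := by ring
        rw [e]

theorem extract_layers_changed : Claim_changed_extract_layers := by
  unfold Claim_changed_extract_layers; decide

theorem extract_layers_tight : Claim_exact_extract_layers := by
  intro s w h _hdom _hpre hD
  obtain ⟨hwneg, hhneg, hge⟩ := hD
  have hpos : 0 < w * h := mul_pos_of_neg_of_neg hwneg hhneg
  have hn1 : 1 ≤ PySem.Int.floordiv (PySem.Str.len s) (w * h) :=
    (PySem.Int.le_floordiv_iff_mul_le hpos).mpr (by rw [one_mul]; exact hge)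
  have hB : extract_layers_alt s w h = [] := by
    simp only [extract_layers_alt]
    rw [if_neg (by omega)]
    exact pv_foldl_step_first w h (Or.inl hwneg) _ _
  intro heq
  have hc : extract_layers s w h = [] := by rw [heq, hB]
  revert hc
  simp only [extract_layers]
  rw [PySem.List.foldl_append_singleton_eq_map]
  intro hc
  have hlen := congrArg List.length hc
  simp only [List.nil_append, List.length_map, PySem.List.length_pyRange_one,
    List.length_nil, sub_zero] at hlen
  omega
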